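-- pv_equiv track=rewrite | github.com/Africa-t0t0/tarea_algoritmos2 | hillClimbingAlgunaMejora.py | factible
-- ===== SOURCE A (Python) =====
-- matriz = [[0,1,1,1,0,0,0,0,0,0,0],
--           [1,0,0,1,0,0,0,0,0,0,0],
--           [1,0,0,1,1,1,0,0,0,0,0],
--           [1,1,1,0,1,0,0,0,0,0,0],
--           [0,0,1,1,0,1,1,1,1,0,0],
--           [0,0,1,0,1,0,0,0,1,0,0],
--           [0,0,0,0,1,0,0,1,0,1,1],
--           [0,0,0,0,1,0,1,0,1,1,0],
--           [0,0,0,0,1,1,0,1,0,1,1],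
--           [0,0,0,0,0,0,1,1,1,0,1],
--           [0,0,0,0,0,0,1,0,1,1,0]]
--
-- def factible(sol):
--     #ver si una solucion es factible, que tenga cobertura total
--     cobertura = [0, 0, 0, 0, 0, 0, 0, 0, 0, 0, 0]
--     for i in range(len(sol)):
--         if sum(cobertura) == len(sol): #si es que la cobertura est치 en todas las comunas, retornar verdadero
--             return True
--         if sol[i] == 1: #si hay pokevacunatorio en la comuna i
--             cobertura[i] = 1 #cubrise a si misma la comuna
--             for j in range(len(sol)): #recorrer las comunas contiguas a la comuna seleccionada
--                 if sum(cobertura) == len(sol):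
--                     return True
--                 if matriz[i][j] == 1:
--                     cobertura[j] = 1 #rellenar las comunas contiguas
--     return False #si es que no hubo solucion factible, retornar falso
-- ===== SOURCE B (Python) =====
-- matriz = [[0,1,1,1,0,0,0,0,0,0,0],
--           [1,0,0,1,0,0,0,0,0,0,0],
--           [1,0,0,1,1,1,0,0,0,0,0],
--           [1,1,1,0,1,0,0,0,0,0,0],
--           [0,0,1,1,0,1,1,1,1,0,0],
--           [0,0,1,0,1,0,0,0,1,0,0],
--           [0,0,0,0,1,0,0,1,0,1,1],
--           [0,0,0,0,1,0,1,0,1,1,0],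
--           [0,0,0,0,1,1,0,1,0,1,1],
--           [0,0,0,0,0,0,1,1,1,0,1],
--           [0,0,0,0,0,0,1,0,1,1,0]]
--
-- def factible(sol):
--     # staged, target-centric: first split the comunas into the selected ones
--     # (which cover themselves) and the unselected ones; a solution is feasible
--     # iff every unselected comuna is adjacent to some selected comuna.
--     selected = [i for i, v in enumerate(sol) if v == 1]
--     uncovered = [j for j, v in enumerate(sol) if v != 1]
--     for j in uncovered:
--         hit = False
--         for i in selected:
--             if matriz[i][j] == 1:
--                 hit = True
--                 break
--         if not hit:
--             return False
--     return True
-- ===== Notes on version B (the rewrite author's own statement) =====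
-- stated objective: simpler
-- what changed: Replaced A's stateful coverage-accumulator with early-return full-coverage checks by a staged target-centric validator: first split comunas into selected and unselected lists, then require every unselected comuna to be adjacent to some selected one; the coverage list and its per-step sum() disappear.
-- intended difference: On the empty list A returns False (the full-coverage check sits inside the never-entered loop), while B returns True, the intended value: an empty instance has zero comunas and all of them are trivially covered. — e.g. on factible([]): A returns false, B returns true
import Mathlib
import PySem

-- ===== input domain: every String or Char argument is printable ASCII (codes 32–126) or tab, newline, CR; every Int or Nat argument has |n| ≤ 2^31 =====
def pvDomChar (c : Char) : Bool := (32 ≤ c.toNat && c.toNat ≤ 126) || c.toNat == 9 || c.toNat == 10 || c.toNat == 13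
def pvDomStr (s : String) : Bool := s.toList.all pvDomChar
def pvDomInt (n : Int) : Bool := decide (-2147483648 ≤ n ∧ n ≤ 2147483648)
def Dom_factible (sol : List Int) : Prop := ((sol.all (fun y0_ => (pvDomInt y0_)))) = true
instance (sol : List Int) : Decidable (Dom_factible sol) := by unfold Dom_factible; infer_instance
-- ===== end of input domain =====

-- B replaces A's stateful coverage accumulator by a staged target-centric check (selected/unselected index lists); B returns True on the empty list where A's misplaced in-loop check makes it return False (see D_).


-- module-level adjacency matrix shared by both programs
def matriz : List (List Int) :=
  [[0,1,1,1,0,0,0,0,0,0,0],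
   [1,0,0,1,0,0,0,0,0,0,0],
   [1,0,0,1,1,1,0,0,0,0,0],
   [1,1,1,0,1,0,0,0,0,0,0],
   [0,0,1,1,0,1,1,1,1,0,0],
   [0,0,1,0,1,0,0,0,1,0,0],
   [0,0,0,0,1,0,0,1,0,1,1],
   [0,0,0,0,1,0,1,0,1,1,0],
   [0,0,0,0,1,1,0,1,0,1,1],
   [0,0,0,0,0,0,1,1,1,0,1],
   [0,0,0,0,0,0,1,0,1,1,0]]

-- matriz[i][j]; all accesses inside Pre_ are in range (i,j ≤ 10), so getD 0 is exact there
def getM (i j : Nat) : Int := ((matriz.getD i []).getD j 0)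

-- ===== PORT A =====
-- inner j-loop of A: early-return True, or the updated cobertura
def innerA (sol : List Int) (i : Nat) : List Nat → List Int → Sum Bool (List Int)
  | [], cob => .inr cob
  | j :: rest, cob =>
    if cob.sum == (sol.length : Int) then .inl true
    else if getM i j == 1 then innerA sol i rest (cob.set j 1)
    else innerA sol i rest cob

-- outer i-loop of A
def outerA (sol : List Int) : List Nat → List Int → Bool
  | [], _ => false
  | i :: rest, cob =>
    if cob.sum == (sol.length : Int) then true
    else if sol.getD i 0 == 1 then
      match innerA sol i (List.range sol.length) (cob.set i 1) with
      | .inl r => r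
      | .inr cob' => outerA sol rest cob'
    else outerA sol rest cob

def factible (sol : List Int) : Bool :=
  outerA sol (List.range sol.length) (List.replicate 11 0)

-- ===== PORT B =====
-- indices of the comunas hosting a vacunatorio (the `selected` comprehension)
def selIdx : Nat → List Int → List Nat
  | _, [] => []
  | k, v :: vs => if v == 1 then k :: selIdx (k + 1) vs else selIdx (k + 1) vs

-- indices of the comunas that must be covered by a neighbour (the `uncovered` comprehension)
def uncIdx : Nat → List Int → List Nat
  | _, [] => []
  | k, v :: vs => if v == 1 then uncIdx (k + 1) vs else k :: uncIdx (k + 1) vs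

-- the inner `for i in selected … break` loop: is comuna j adjacent to a selected comuna?
def hitBy (j : Nat) : List Nat → Bool
  | [] => false
  | i :: is => if getM i j == 1 then true else hitBy j is

-- the outer `for j in uncovered` loop with its early `return False`
def allHit (sel : List Nat) : List Nat → Bool
  | [] => true
  | j :: js => if hitBy j sel then allHit sel js else false

def factible_alt (sol : List Int) : Bool := allHit (selIdx 0 sol) (uncIdx 0 sol)

-- ===== PRECONDITION & SPEC =====
-- Pre_ excludes exactly the inputs where A raises IndexError: more than 11 comunas with at
-- least one selected node (cobertura/matriz have only 11 slots).
def Pre_factible (sol : List Int) : Prop := sol.length ≤ 11 ∨ ¬ (1 ∈ sol)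
instance (sol : List Int) : Decidable (Pre_factible sol) := by unfold Pre_factible; infer_instance
def pvWitness_factible : List Int := [1, 0, 1]

-- On the empty list A returns False (its full-coverage check sits inside the never-entered
-- loop) while B returns the intended True: zero comunas are all trivially covered.
def D_factible (sol : List Int) : Prop := sol = []
instance (sol : List Int) : Decidable (D_factible sol) := by unfold D_factible; infer_instance
def Spec_factible (sol : List Int) (out : Bool) : Prop := ¬ D_factible sol → out = factible_alt sol
instance (sol : List Int) (out : Bool) : Decidable (Spec_factible sol out) := by unfold Spec_factible; infer_instance
def pvDiffWitness_factible : List Int := []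
def pvDiffWitnessOut_factible : Bool × Bool := (false, true)

-- ===== CLAIM =====
def Claim_unchanged_factible : Prop := ∀ (sol : List Int), Dom_factible sol → Pre_factible sol → Spec_factible sol (factible sol)
def Claim_changed_factible : Prop := Dom_factible (pvDiffWitness_factible) ∧ Pre_factible (pvDiffWitness_factible) ∧ D_factible (pvDiffWitness_factible) ∧ factible (pvDiffWitness_factible) = pvDiffWitnessOut_factible.1 ∧ factible_alt (pvDiffWitness_factible) = pvDiffWitnessOut_factible.2 ∧ pvDiffWitnessOut_factible.1 ≠ pvDiffWitnessOut_factible.2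
def Claim_exact_factible : Prop := ∀ (sol : List Int), Dom_factible sol → Pre_factible sol → D_factible sol → factible sol ≠ factible_alt sol

-- ===== LEMMAS AND PROOFS =====

-- sel sol k: "comuna k hosts a vacunatorio" (sol[k] == 1); adjB: adjacency bit
def sel (sol : List Int) (k : Nat) : Bool := sol.getD k 0 == 1
def adjB (i j : Nat) : Bool := getM i j == 1
-- cov sol j: comuna j is covered (B's per-comuna condition)
def cov (sol : List Int) (j : Nat) : Bool :=
  sel sol j || (List.range sol.length).any (fun i => sel sol i && adjB i j)

-- ---- characterisation of B's staged implementation ----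

lemma allHit_eq : ∀ (js sel : List Nat), allHit sel js = js.all (fun j => hitBy j sel) := by
  intro js sel
  induction js with
  | nil => rfl
  | cons j js ih =>
    simp only [allHit, List.all_cons, ih]
    by_cases h : hitBy j sel = true <;> simp [h]

lemma hitBy_eq : ∀ (is : List Nat) (j : Nat), hitBy j is = is.any (fun i => getM i j == 1) := by
  intro is j
  induction is with
  | nil => rfl
  | cons i is ih =>
    simp only [hitBy, List.any_cons, ih]
    by_cases h : (getM i j == 1) = true <;> simp [h]

lemma mem_selIdx : ∀ (vs : List Int) (k i : Nat),
    i ∈ selIdx k vs ↔ ∃ d, d < vs.length ∧ i = k + d ∧ (vs.getD d 0 == 1) = true := by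
  intro vs
  induction vs with
  | nil => intro k i; simp [selIdx]
  | cons v vs ih =>
    intro k i
    rw [selIdx]
    by_cases hv : (v == 1) = true
    · rw [if_pos hv, List.mem_cons, ih]
      constructor
      · rintro (rfl | ⟨d, hd, rfl, hval⟩)
        · exact ⟨0, by simp, by omega, by simpa using hv⟩
        · exact ⟨d + 1, by simp; omega, by omega, by simpa using hval⟩
      · rintro ⟨d, hd, rfl, hval⟩
        cases d with
        | zero => exact Or.inl (by omega)
        | succ d => exact Or.inr ⟨d, by simp at hd; omega, by omega, by simpa using hval⟩
    · rw [if_neg hv, ih]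
      constructor
      · rintro ⟨d, hd, rfl, hval⟩
        exact ⟨d + 1, by simp; omega, by omega, by simpa using hval⟩
      · rintro ⟨d, hd, rfl, hval⟩
        cases d with
        | zero => rw [List.getD_cons_zero] at hval; exact absurd hval hv
        | succ d => exact ⟨d, by simp at hd; omega, by omega, by simpa using hval⟩

lemma mem_uncIdx : ∀ (vs : List Int) (k j : Nat),
    j ∈ uncIdx k vs ↔ ∃ d, d < vs.length ∧ j = k + d ∧ (vs.getD d 0 == 1) = false := by
  intro vs
  induction vs with
  | nil => intro k j; simp [uncIdx]
  | cons v vs ih =>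
    intro k j
    rw [uncIdx]
    by_cases hv : (v == 1) = true
    · rw [if_pos hv, ih]
      constructor
      · rintro ⟨d, hd, rfl, hval⟩
        exact ⟨d + 1, by simp; omega, by omega, by simpa using hval⟩
      · rintro ⟨d, hd, rfl, hval⟩
        cases d with
        | zero => rw [List.getD_cons_zero] at hval; rw [hv] at hval; cases hval
        | succ d => exact ⟨d, by simp at hd; omega, by omega, by simpa using hval⟩
    · rw [if_neg hv, List.mem_cons, ih]
      constructor
      · rintro (rfl | ⟨d, hd, rfl, hval⟩)
        · exact ⟨0, by simp, by omega, by simpa using Bool.eq_false_iff.mpr hv⟩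
        · exact ⟨d + 1, by simp; omega, by omega, by simpa using hval⟩
      · rintro ⟨d, hd, rfl, hval⟩
        cases d with
        | zero => exact Or.inl (by omega)
        | succ d => exact Or.inr ⟨d, by simp at hd; omega, by omega, by simpa using hval⟩

lemma alt_eq (sol : List Int) : factible_alt sol = (List.range sol.length).all (cov sol) := by
  rw [Bool.eq_iff_iff, factible_alt, allHit_eq, List.all_eq_true, List.all_eq_true]
  have hhit : ∀ j, hitBy j (selIdx 0 sol) = true ↔
      ∃ d, d < sol.length ∧ (sel sol d && adjB d j) = true := by
    intro j
    rw [hitBy_eq, List.any_eq_true]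
    constructor
    · rintro ⟨i, hmem, hadj⟩
      obtain ⟨d, hd, rfl, hval⟩ := (mem_selIdx sol 0 i).mp hmem
      rw [Nat.zero_add] at hadj
      refine ⟨d, hd, ?_⟩
      simp only [sel, adjB, Bool.and_eq_true]
      exact ⟨hval, hadj⟩
    · rintro ⟨d, hd, hval⟩
      simp only [Bool.and_eq_true, sel, adjB] at hval
      exact ⟨d, (mem_selIdx sol 0 d).mpr ⟨d, hd, by omega, hval.1⟩, hval.2⟩
  constructor
  · intro h j hjmem
    have hj := List.mem_range.mp hjmem
    by_cases hs : sel sol j = true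
    · simp [cov, hs]
    · have hs' : (sol.getD j 0 == 1) = false := by
        have := Bool.eq_false_iff.mpr hs
        simpa only [sel] using this
      have hjm : j ∈ uncIdx 0 sol := (mem_uncIdx sol 0 j).mpr ⟨j, hj, by omega, hs'⟩
      obtain ⟨d, hd, hval⟩ := (hhit j).mp (h j hjm)
      simp only [cov, Bool.or_eq_true, List.any_eq_true, List.mem_range]
      exact Or.inr ⟨d, hd, hval⟩
  · intro h j hjmem
    obtain ⟨d, hd, rfl, hval⟩ := (mem_uncIdx sol 0 j).mp hjmem
    rw [Nat.zero_add]
    have hc := h d (List.mem_range.mpr hd)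
    simp only [cov, Bool.or_eq_true, List.any_eq_true, List.mem_range] at hc
    rcases hc with hs | ⟨i, hi, hval'⟩
    · simp only [sel] at hs
      rw [hs] at hval
      cases hval
    · exact (hhit d).mpr ⟨i, hi, hval'⟩

-- ---- exact state of A's loops ----

-- exact contents of A's cobertura before outer iteration i
def pOut (sol : List Int) (i k : Nat) : Bool :=
  (sel sol k && decide (k < i)) ||
  (decide (k < sol.length) && (List.range i).any (fun i' => sel sol i' && adjB i' k))
-- exact contents of A's cobertura inside outer iteration i before inner iteration j
def pIn (sol : List Int) (i j k : Nat) : Bool :=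
  pOut sol i k || k == i || (decide (k < j) && adjB i k)
-- cobertura as a list, from its characteristic function
def mkList (p : Nat → Bool) : List Int := (List.range 11).map (fun k => if p k then 1 else 0)

lemma beq_cast_nat (a b : Nat) : ((a : Int) == (b : Int)) = (a == b) := by
  by_cases h : a = b <;> simp [h]

lemma sum_mkList (p : Nat → Bool) : (mkList p).sum = ((List.range 11).countP p : Int) :=
  PySem.List.sum_map_ite_one_zero p (List.range 11)

lemma set_mkList (p : Nat → Bool) (j : Nat) (_hj : j < 11) :
    (mkList p).set j 1 = mkList (fun k => p k || k == j) := by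
  apply List.ext_getElem
  · simp [mkList]
  · intro k hk1 hk2
    simp only [mkList, List.length_set, List.length_map, List.length_range] at hk1 hk2
    simp only [mkList, List.getElem_set, List.getElem_map, List.getElem_range]
    by_cases h : j = k
    · simp [h]
    · have : (k == j) = false := beq_eq_false_iff_ne.mpr (Ne.symm h)
      simp [h, this]

lemma congr_mkList (p q : Nat → Bool) (h : ∀ k, k < 11 → p k = q k) : mkList p = mkList q := by
  exact List.map_congr_left (fun k hk => by rw [h k (List.mem_range.mp hk)])

lemma zero_mkList : List.replicate 11 (0 : Int) = mkList (fun _ => false) := by decide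

lemma countP_full (sol_n : Nat) (hn : sol_n ≤ 11) (p : Nat → Bool) (hb : ∀ k, p k = true → k < sol_n) :
    (List.range 11).countP p = sol_n ↔ ∀ j, j < sol_n → p j = true := by
  have h11 : List.range 11 = List.range sol_n ++ List.range' sol_n (11 - sol_n) := by
    have key : List.range' 0 sol_n ++ List.range' (0 + 1 * sol_n) (11 - sol_n)
        = List.range' 0 (sol_n + (11 - sol_n)) := List.range'_append
    simp only [Nat.zero_add, Nat.one_mul] at key
    rw [List.range_eq_range', List.range_eq_range', key]
    congr 1
    omega
  have hsplit : (List.range 11).countP p = (List.range sol_n).countP p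
      + (List.range' sol_n (11 - sol_n)).countP p := by
    rw [h11, List.countP_append]
  have hzero : (List.range' sol_n (11 - sol_n)).countP p = 0 := by
    refine List.countP_eq_zero.mpr (fun a ha hpa => ?_)
    have hmem := List.mem_range'_1.mp ha
    have := hb a hpa
    omega
  constructor
  · intro hc j hj
    have hlenn : (List.range sol_n).countP p = sol_n := by omega
    have hall := List.countP_eq_length.mp (by rw [hlenn, List.length_range])
    exact hall j (List.mem_range.mpr hj)
  · intro hall
    have hc : List.countP p (List.range sol_n) = (List.range sol_n).length :=
      List.countP_eq_length.mpr (fun a ha => hall a (List.mem_range.mp ha))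
    rw [List.length_range] at hc
    omega

lemma diag_false : ∀ d, d < 11 → adjB d d = false := by decide

lemma bound_pOut (sol : List Int) (i k : Nat) (hi : i ≤ sol.length) :
    pOut sol i k = true → k < sol.length ∧ cov sol k = true := by
  intro h
  simp only [pOut, Bool.or_eq_true, Bool.and_eq_true, decide_eq_true_eq, List.any_eq_true,
    List.mem_range] at h
  rcases h with ⟨hsel, hki⟩ | ⟨hkn, i', hi', hsi', hadj⟩
  · refine ⟨by omega, ?_⟩
    simp [cov, hsel]
  · refine ⟨hkn, ?_⟩
    simp only [cov, Bool.or_eq_true, List.any_eq_true, List.mem_range, Bool.and_eq_true]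
    exact Or.inr ⟨i', by omega, hsi', hadj⟩

lemma bound_pIn (sol : List Int) (i j k : Nat) (hsel : sel sol i = true) (hi : i < sol.length)
    (hj : j ≤ sol.length) : pIn sol i j k = true → k < sol.length ∧ cov sol k = true := by
  intro h
  simp only [pIn, Bool.or_eq_true, Bool.and_eq_true, decide_eq_true_eq, beq_iff_eq] at h
  rcases h with (hout | hki) | ⟨hkj, hadj⟩
  · exact bound_pOut sol i k (by omega) hout
  · subst hki
    refine ⟨hi, ?_⟩
    simp [cov, hsel]
  · refine ⟨by omega, ?_⟩
    simp only [cov, Bool.or_eq_true, List.any_eq_true, List.mem_range, Bool.and_eq_true]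
    exact Or.inr ⟨i, hi, hsel, hadj⟩

lemma skip_pOut (sol : List Int) (i k : Nat) (h : sel sol i = false) :
    pOut sol (i+1) k = pOut sol i k := by
  simp only [pOut, List.range_succ, List.any_append, List.any_cons, List.any_nil, h,
    Bool.false_and, Bool.or_false]
  by_cases hk : k = i
  · subst hk; simp [h]
  · rw [show (decide (k < i + 1)) = (decide (k < i)) from by simp only [decide_eq_decide]; omega]

lemma next_pOut (sol : List Int) (i k : Nat) (hsel : sel sol i = true) (hi : i < sol.length) :
    pIn sol i sol.length k = pOut sol (i+1) k := by
  rw [Bool.eq_iff_iff]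
  simp only [pIn, pOut, Bool.or_eq_true, Bool.and_eq_true, decide_eq_true_eq, beq_iff_eq,
    List.any_eq_true, List.mem_range]
  constructor
  · rintro (((⟨hs, hk⟩ | ⟨hn, w, hw, hws, hwa⟩) | hki) | ⟨hn, ha⟩)
    · exact Or.inl ⟨hs, by omega⟩
    · exact Or.inr ⟨hn, w, by omega, hws, hwa⟩
    · subst hki; exact Or.inl ⟨hsel, by omega⟩
    · exact Or.inr ⟨hn, i, by omega, hsel, ha⟩
  · rintro (⟨hs, hk⟩ | ⟨hn, w, hw, hws, hwa⟩)
    · by_cases hki : k = i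
      · exact Or.inl (Or.inr hki)
      · exact Or.inl (Or.inl (Or.inl ⟨hs, by omega⟩))
    · by_cases hwi : w = i
      · subst hwi; exact Or.inr ⟨hn, hwa⟩
      · exact Or.inl (Or.inl (Or.inr ⟨hn, w, by omega, hws, hwa⟩))

lemma step_pIn_t (sol : List Int) (i j k : Nat) (h : adjB i j = true) :
    (pIn sol i j k || k == j) = pIn sol i (j+1) k := by
  rw [Bool.eq_iff_iff]
  simp only [pIn, Bool.or_eq_true, Bool.and_eq_true, decide_eq_true_eq, beq_iff_eq]
  constructor
  · rintro (((ho | hki) | ⟨hkj, ha⟩) | hkj)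
    · exact Or.inl (Or.inl ho)
    · exact Or.inl (Or.inr hki)
    · exact Or.inr ⟨by omega, ha⟩
    · subst hkj; exact Or.inr ⟨by omega, h⟩
  · rintro ((ho | hki) | ⟨hkj, ha⟩)
    · exact Or.inl (Or.inl (Or.inl ho))
    · exact Or.inl (Or.inl (Or.inr hki))
    · by_cases hk : k = j
      · exact Or.inr hk
      · exact Or.inl (Or.inr ⟨by omega, ha⟩)

lemma step_pIn_f (sol : List Int) (i j k : Nat) (h : adjB i j = false) :
    pIn sol i j k = pIn sol i (j+1) k := by
  rw [Bool.eq_iff_iff]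
  simp only [pIn, Bool.or_eq_true, Bool.and_eq_true, decide_eq_true_eq, beq_iff_eq]
  constructor
  · rintro ((ho | hki) | ⟨hkj, ha⟩)
    · exact Or.inl (Or.inl ho)
    · exact Or.inl (Or.inr hki)
    · exact Or.inr ⟨by omega, ha⟩
  · rintro ((ho | hki) | ⟨hkj, ha⟩)
    · exact Or.inl (Or.inl ho)
    · exact Or.inl (Or.inr hki)
    · by_cases hk : k = j
      · subst hk; rw [h] at ha; exact absurd ha (by simp)
      · exact Or.inr ⟨by omega, ha⟩

lemma cov_pOut_final (sol : List Int) (k : Nat) :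
    pOut sol sol.length k = (decide (k < sol.length) && cov sol k) := by
  rw [Bool.eq_iff_iff]
  simp only [pOut, cov, Bool.or_eq_true, Bool.and_eq_true, decide_eq_true_eq, List.any_eq_true,
    List.mem_range]
  constructor
  · rintro (⟨hs, hk⟩ | ⟨hk, w, hw, hws, hwa⟩)
    · exact ⟨hk, Or.inl hs⟩
    · exact ⟨hk, Or.inr ⟨w, hw, hws, hwa⟩⟩
  · rintro ⟨hk, hs | ⟨w, hw, hws, hwa⟩⟩
    · exact Or.inl ⟨hs, hk⟩
    · exact Or.inr ⟨hk, w, hw, hws, hwa⟩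

lemma all_cov_iff (sol : List Int) (hn : sol.length ≤ 11) :
    (List.range sol.length).all (cov sol) = true ↔
      (List.range 11).countP (pOut sol sol.length) = sol.length := by
  have hb : ∀ k, pOut sol sol.length k = true → k < sol.length :=
    fun k h => (bound_pOut sol _ k le_rfl h).1
  rw [List.all_eq_true, countP_full sol.length hn _ hb]
  constructor
  · intro h j hj
    rw [cov_pOut_final]
    simp [hj, h j (List.mem_range.mpr hj)]
  · intro h j hjmem
    have := h j (List.mem_range.mp hjmem)
    rw [cov_pOut_final] at this
    simp only [Bool.and_eq_true] at this
    exact this.2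

-- inner loop: if it early-returns, every comuna is covered
lemma inner_sound (sol : List Int) : ∀ (m j i : Nat), sel sol i = true → i < sol.length →
    j + m = sol.length → sol.length ≤ 11 → ∀ (r : Bool),
    innerA sol i (List.range' j m) (mkList (pIn sol i j)) = Sum.inl r →
    r = true ∧ ∀ j', j' < sol.length → cov sol j' = true := by
  intro m
  induction m with
  | zero =>
    intro j i hsel hi hjm hn r hres
    simp [List.range'_zero, innerA] at hres
  | succ m ih =>
    intro j i hsel hi hjm hn r hres
    rw [List.range'_succ] at hres
    simp only [innerA] at hres
    by_cases hfire : ((mkList (pIn sol i j)).sum == (sol.length : Int)) = true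
    · rw [if_pos hfire] at hres
      injection hres with hr
      refine ⟨hr.symm, ?_⟩
      rw [sum_mkList, beq_cast_nat] at hfire
      have hcount := eq_of_beq hfire
      have hfull := (countP_full sol.length hn _
        (fun k hk => (bound_pIn sol i j k hsel hi (by omega) hk).1)).mp hcount
      intro j' hj'
      exact (bound_pIn sol i j j' hsel hi (by omega) (hfull j' hj')).2
    · rw [if_neg hfire] at hres
      by_cases hadj : (getM i j == 1) = true
      · rw [if_pos hadj, set_mkList _ j (by omega),
          congr_mkList _ _ (fun k _ => step_pIn_t sol i j k hadj)] at hres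
        exact ih (j+1) i hsel hi (by omega) hn r hres
      · rw [if_neg hadj,
          congr_mkList _ _ (fun k _ => step_pIn_f sol i j k (Bool.eq_false_iff.mpr hadj))] at hres
        exact ih (j+1) i hsel hi (by omega) hn r hres

-- inner loop: if it does not early-return, it returns the exact updated cobertura
lemma inner_exact (sol : List Int) : ∀ (m j i : Nat), i < sol.length →
    j + m = sol.length → sol.length ≤ 11 → ∀ (cob' : List Int),
    innerA sol i (List.range' j m) (mkList (pIn sol i j)) = Sum.inr cob' →
    cob' = mkList (pIn sol i sol.length) := by
  intro m
  induction m with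
  | zero =>
    intro j i hi hjm hn cob' hres
    simp only [List.range'_zero, innerA] at hres
    injection hres with h
    obtain rfl : j = sol.length := by omega
    exact h.symm
  | succ m ih =>
    intro j i hi hjm hn cob' hres
    rw [List.range'_succ] at hres
    simp only [innerA] at hres
    by_cases hfire : ((mkList (pIn sol i j)).sum == (sol.length : Int)) = true
    · rw [if_pos hfire] at hres
      simp at hres
    · rw [if_neg hfire] at hres
      by_cases hadj : (getM i j == 1) = true
      · rw [if_pos hadj, set_mkList _ j (by omega),
          congr_mkList _ _ (fun k _ => step_pIn_t sol i j k hadj)] at hres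
        exact ih (j+1) i hi (by omega) hn cob' hres
      · rw [if_neg hadj,
          congr_mkList _ _ (fun k _ => step_pIn_f sol i j k (Bool.eq_false_iff.mpr hadj))] at hres
        exact ih (j+1) i hi (by omega) hn cob' hres

-- inner loop of the LAST outer iteration: if it does not early-return, coverage is not full
-- (the only unchecked completion point would need matriz[i][i] = 1, and the diagonal is 0)
lemma inner_last (sol : List Int) : ∀ (m j i : Nat), i + 1 = sol.length → 1 ≤ m →
    j + m = sol.length → sol.length ≤ 11 → ∀ (cob' : List Int),
    innerA sol i (List.range' j m) (mkList (pIn sol i j)) = Sum.inr cob' →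
    (cob'.sum == (sol.length : Int)) = false := by
  intro m
  induction m with
  | zero =>
    intro j i hi1 hm
    exact absurd hm (by omega)
  | succ m ih =>
    intro j i hi1 hm hjm hn cob' hres
    rw [List.range'_succ] at hres
    simp only [innerA] at hres
    by_cases hfire : ((mkList (pIn sol i j)).sum == (sol.length : Int)) = true
    · rw [if_pos hfire] at hres
      simp at hres
    · rw [if_neg hfire] at hres
      cases m with
      | zero =>
        obtain rfl : j = i := by omega
        have hdiag : adjB j j = false := diag_false j (by omega)
        have hne : ¬((getM j j == 1) = true) := by
          have h' : (getM j j == 1) = false := hdiag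
          simp [h']
        rw [if_neg hne] at hres
        simp only [List.range'_zero, innerA] at hres
        injection hres with h
        rw [← h, sum_mkList, beq_cast_nat]
        exact Bool.eq_false_iff.mpr
          (fun hc => hfire (by rw [sum_mkList, beq_cast_nat]; exact hc))
      | succ m' =>
        by_cases hadj : (getM i j == 1) = true
        · rw [if_pos hadj, set_mkList _ j (by omega),
            congr_mkList _ _ (fun k _ => step_pIn_t sol i j k hadj)] at hres
          exact ih (j+1) i hi1 (by omega) (by omega) hn cob' hres
        · rw [if_neg hadj,
            congr_mkList _ _ (fun k _ => step_pIn_f sol i j k (Bool.eq_false_iff.mpr hadj))] at hres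
          exact ih (j+1) i hi1 (by omega) (by omega) hn cob' hres

-- outer loop from the exact state: A's verdict equals B's verdict
lemma outer_main (sol : List Int) : ∀ (m i : Nat), 1 ≤ m → i + m = sol.length →
    sol.length ≤ 11 →
    outerA sol (List.range' i m) (mkList (pOut sol i)) = (List.range sol.length).all (cov sol) := by
  have all_cov_false : ∀ (hn : sol.length ≤ 11),
      (List.range 11).countP (pOut sol sol.length) ≠ sol.length →
      (List.range sol.length).all (cov sol) = false := by
    intro hn h
    cases hval : (List.range sol.length).all (cov sol) with
    | false => rfl
    | true => exact absurd ((all_cov_iff sol hn).mp hval) h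
  intro m
  induction m with
  | zero =>
    intro i hm
    exact absurd hm (by omega)
  | succ m ih =>
    intro i hm him hn
    rw [List.range'_succ]
    simp only [outerA]
    by_cases hfire : ((mkList (pOut sol i)).sum == (sol.length : Int)) = true
    · rw [if_pos hfire]
      symm
      rw [List.all_eq_true]
      rw [sum_mkList, beq_cast_nat] at hfire
      have hcount := eq_of_beq hfire
      have hfull := (countP_full sol.length hn _
        (fun k hk => (bound_pOut sol i k (by omega) hk).1)).mp hcount
      intro x hx
      exact (bound_pOut sol i x (by omega) (hfull x (List.mem_range.mp hx))).2
    · rw [if_neg hfire]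
      by_cases hsel : (sol.getD i 0 == 1) = true
      · rw [if_pos hsel]
        have hstate : (mkList (pOut sol i)).set i 1 = mkList (pIn sol i 0) := by
          rw [set_mkList _ i (by omega)]
          exact congr_mkList _ _ (fun k _ => by
            simp only [pIn]
            rw [show decide (k < 0) = false from by simp]
            simp)
        rw [hstate]
        cases hres : innerA sol i (List.range sol.length) (mkList (pIn sol i 0)) with
        | inl r =>
          rw [List.range_eq_range'] at hres
          obtain ⟨rfl, hcov⟩ :=
            inner_sound sol sol.length 0 i hsel (by omega) (by omega) hn r hres
          show true = _
          symm
          rw [List.all_eq_true]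
          intro x hx
          exact hcov x (List.mem_range.mp hx)
        | inr cob' =>
          rw [List.range_eq_range'] at hres
          have hcob := inner_exact sol sol.length 0 i (by omega) (by omega) hn cob' hres
          have e1 : cob' = mkList (pOut sol (i+1)) :=
            hcob.trans (congr_mkList _ _ (fun k _ => next_pOut sol i k hsel (by omega)))
          cases m with
          | zero =>
            have hin : i + 1 = sol.length := by omega
            have hsum := inner_last sol sol.length 0 i hin (by omega) (by omega) hn cob' hres
            rw [e1, sum_mkList, beq_cast_nat] at hsum
            have hcount : (List.range 11).countP (pOut sol (i+1)) ≠ sol.length := by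
              intro hc
              rw [hc] at hsum
              simp at hsum
            have hcount' : (List.range 11).countP (pOut sol sol.length) ≠ sol.length := by
              intro hc
              rw [← hin] at hc
              exact hcount (hc.trans hin)
            show false = _
            rw [all_cov_false hn hcount']
          | succ m' =>
            rw [e1]
            show outerA sol (List.range' (i+1) (m'+1)) (mkList (pOut sol (i+1))) = _
            exact ih (i+1) (by omega) (by omega) hn
      · rw [if_neg hsel]
        have hstate : mkList (pOut sol i) = mkList (pOut sol (i+1)) :=
          congr_mkList _ _ (fun k _ => (skip_pOut sol i k (Bool.eq_false_iff.mpr hsel)).symm)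
        rw [hstate]
        cases m with
        | zero =>
          have hin : i + 1 = sol.length := by omega
          rw [sum_mkList, beq_cast_nat] at hfire
          have hcount : (List.range 11).countP (pOut sol i) ≠ sol.length := by
            intro hc
            exact hfire (by simp [hc])
          have hcount' : (List.range 11).countP (pOut sol sol.length) ≠ sol.length := by
            intro hc
            rw [← hin] at hc
            have hcc : List.countP (pOut sol (i+1)) (List.range 11)
                = List.countP (pOut sol i) (List.range 11) :=
              List.countP_congr
                (fun a _ => by rw [skip_pOut sol i a (Bool.eq_false_iff.mpr hsel)])
            rw [hcc] at hc
            exact hcount (hc.trans hin)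
          show false = _
          rw [all_cov_false hn hcount']
        | succ m' =>
          exact ih (i+1) (by omega) (by omega) hn

lemma getD_ne_one (sol : List Int) (h1 : ¬ (1 ∈ sol)) (i : Nat) :
    (sol.getD i 0 == 1) = false := by
  rw [List.getD_eq_getElem?_getD]
  cases h : sol[i]? with
  | none => simp
  | some x =>
    simp only [Option.getD_some]
    exact beq_eq_false_iff_ne.mpr (fun hx => h1 (hx ▸ List.mem_of_getElem? h))

-- the no-selected-node case (covers length > 11)
lemma outerA_none (sol : List Int) (h1 : ¬ (1 ∈ sol)) (hne : sol ≠ []) :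
    ∀ (is : List Nat), outerA sol is (List.replicate 11 0) = false := by
  intro is
  have hlen : sol.length ≠ 0 := by simpa [List.length_eq_zero_iff] using hne
  have hsum : (List.replicate 11 (0 : Int)).sum = 0 := by decide
  have hbeq : ((List.replicate 11 (0 : Int)).sum == (sol.length : Int)) = false := by
    rw [hsum]
    exact beq_eq_false_iff_ne.mpr (fun hc => hlen (by exact_mod_cast hc.symm))
  induction is with
  | nil => rfl
  | cons i rest ih =>
    rw [outerA]
    simp only [hbeq, getD_ne_one sol h1, Bool.false_eq_true, if_false]
    exact ih

lemma factible_alt_none (sol : List Int) (h1 : ¬ (1 ∈ sol)) (hne : sol ≠ []) :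
    factible_alt sol = false := by
  have hlen : 0 < sol.length := by
    cases sol with | nil => exact absurd rfl hne | cons x xs => simp
  have hsel : ∀ i, sel sol i = false := fun i => getD_ne_one sol h1 i
  rw [alt_eq]
  refine List.all_eq_false.mpr ⟨0, List.mem_range.mpr hlen, ?_⟩
  simp [cov, hsel]

theorem factible_spec : Claim_unchanged_factible := by
  intro sol _ hpre hnD
  have hne : sol ≠ [] := fun h => hnD h
  have hlen0 : 1 ≤ sol.length := by
    cases sol with | nil => exact absurd rfl hne | cons x xs => simp
  rcases hpre with hlen | h1
  · have h0 : factible sol = outerA sol (List.range' 0 sol.length) (mkList (pOut sol 0)) := by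
      rw [factible, List.range_eq_range', zero_mkList]
      congr 1
      exact congr_mkList _ _ (fun k _ => by simp [pOut])
    rw [h0, outer_main sol sol.length 0 hlen0 (by omega) hlen, alt_eq]
  · rw [factible, outerA_none sol h1 hne, factible_alt_none sol h1 hne]

theorem factible_changed : Claim_changed_factible := by unfold Claim_changed_factible; decide

theorem factible_tight : Claim_exact_factible := by
  intro sol _ _ hD
  subst hD; decide
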